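-- pv_equiv track=rewrite | github.com/frkl/trojai-fuzzing-vision | util/perm_inv_v1b.py | validate_comps_paired
-- ===== SOURCE A (Python) =====
-- import itertools
--
-- def validate_comps_paired(prefix,suffix,k=2):
--     #Both need to participate
--     #Prefix needs to perfectly split
--     #Solution might not exist
--     n=len(prefix)
--     cfgs=list(itertools.product(*([list(range(k))]*n)))
--     valid_cfgs=[];
--     for c in cfgs:
--         #Check whether all items are present
--         if not len(set(c))==k:
--             continue;
--
--         valid_cfgs.append(c)
--
--     valid_cfgs=[(prefix,suffix,cfg) for cfg in valid_cfgs]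
--     #Try removing duplicates if any?
--
--     return valid_cfgs
-- ===== SOURCE B (Python) =====
-- def validate_comps_paired(prefix, suffix, k=2):
--     # DFS assigning labels position by position, tracking the set of used
--     # labels; prune when the unused labels cannot all fit in the remaining
--     # positions; emit a configuration only when all k labels were used.
--     n = len(prefix)
--     results = []
--
--     def dfs(pos, cfg, used):
--         if k - len(used) > n - pos:
--             return
--         if pos == n:
--             if len(used) == k:
--                 results.append(cfg)
--             return
--         for label in range(k):
--             dfs(pos + 1, cfg + (label,), used | {label})
--
--     dfs(0, (), frozenset())
--     return [(prefix, suffix, cfg) for cfg in results]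
-- ===== Notes on version B (the rewrite author's own statement) =====
-- stated objective: alternative
-- what changed: Replaces generate-all-k^n-tuples-then-filter with a recursive DFS that extends a partial configuration position by position, carries the set of used labels, prunes branches where the unused labels cannot fit in the remaining positions, and emits only surjective configurations at the leaves.
import Mathlib
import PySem

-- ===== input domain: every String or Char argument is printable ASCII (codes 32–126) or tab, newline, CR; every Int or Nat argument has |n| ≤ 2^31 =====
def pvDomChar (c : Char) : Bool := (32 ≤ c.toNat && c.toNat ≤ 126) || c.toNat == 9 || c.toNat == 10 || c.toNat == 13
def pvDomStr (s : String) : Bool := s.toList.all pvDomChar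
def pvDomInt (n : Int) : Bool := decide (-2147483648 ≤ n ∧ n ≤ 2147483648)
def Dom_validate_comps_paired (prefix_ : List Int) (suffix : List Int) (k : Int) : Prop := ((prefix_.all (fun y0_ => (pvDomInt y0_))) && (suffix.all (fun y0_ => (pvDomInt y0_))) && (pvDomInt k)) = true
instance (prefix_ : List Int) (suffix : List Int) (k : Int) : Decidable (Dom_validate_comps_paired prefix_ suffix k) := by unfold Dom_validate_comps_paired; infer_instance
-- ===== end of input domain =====

-- B replaces A's enumerate-all-tuples-then-filter with a pruned DFS over partial
-- configurations carrying the set of used labels (alternative decomposition, same result).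

-- ===== PORT A =====
-- itertools.product(*([list(range(k))]*n)) in product order (leftmost slot varies slowest)
def pvProductRep (n : Nat) (xs : List Int) : List (List Int) :=
  match n with
  | 0 => [[]]
  | m + 1 => xs.flatMap (fun x => (pvProductRep m xs).map (fun c => x :: c))

def validate_comps_paired (prefix_ : List Int) (suffix : List Int) (k : Int) : List (List Int × List Int × List Int) :=
  let n := prefix_.length
  let cfgs := pvProductRep n (PySem.List.pyRange 0 k 1)
  let valid_cfgs := cfgs.foldl (fun acc c =>
    if PySem.Set.len (PySem.Set.ofList c) = k then acc ++ [c] else acc) []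
  valid_cfgs.map (fun cfg => (prefix_, suffix, cfg))

-- ===== PORT B =====
-- dfs(pos, cfg, used) of Source B; recursion on rem = n - pos; 'used | {label}' is Set.union
def pvDfs (k : Int) (rem : Nat) (cfg : List Int) (used : PySem.Set Int) : List (List Int) :=
  if k - PySem.Set.len used > (rem : Int) then []
  else
    match rem with
    | 0 => if PySem.Set.len used = k then [cfg] else []
    | r + 1 => (PySem.List.pyRange 0 k 1).flatMap
        (fun label => pvDfs k r (cfg ++ [label]) (PySem.Set.union used [label]))

def validate_comps_paired_alt (prefix_ : List Int) (suffix : List Int) (k : Int) : List (List Int × List Int × List Int) :=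
  (pvDfs k prefix_.length [] PySem.Set.empty).map (fun cfg => (prefix_, suffix, cfg))

-- ===== PRECONDITION & SPEC =====
def Spec_validate_comps_paired (prefix_ : List Int) (suffix : List Int) (k : Int) (out : List (List Int × List Int × List Int)) : Prop := out = validate_comps_paired_alt prefix_ suffix k
instance (prefix_ : List Int) (suffix : List Int) (k : Int) (out : List (List Int × List Int × List Int)) : Decidable (Spec_validate_comps_paired prefix_ suffix k out) := by unfold Spec_validate_comps_paired; infer_instance

-- ===== CLAIM (what is proved, stated in full; the proofs are below) =====
def Claim_equal_validate_comps_paired : Prop := ∀ (prefix_ : List Int) (suffix : List Int) (k : Int), Dom_validate_comps_paired prefix_ suffix k → Spec_validate_comps_paired prefix_ suffix k (validate_comps_paired prefix_ suffix k)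

-- ===== LEMMAS AND PROOFS =====

lemma pvUnion_singleton (s : PySem.Set Int) (x : Int) :
    PySem.Set.union s [x] = PySem.Set.add s x := rfl

-- len of a set grows by at most one per add
lemma pvLen_add_le {s : PySem.Set Int} {x : Int} :
    (PySem.Set.add s x).length ≤ s.length + 1 := by
  unfold PySem.Set.add
  split <;> simp

-- len after updating with a list grows by at most its length
lemma pvLen_update_le (c : List Int) (s : PySem.Set Int) :
    (PySem.Set.update s c).length ≤ s.length + c.length := by
  induction c generalizing s with
  | nil => simp [PySem.Set.update]
  | cons x c ih =>
    rw [PySem.Set.update_cons]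
    have h1 := ih (PySem.Set.add s x)
    have h2 : (PySem.Set.add s x).length ≤ s.length + 1 := pvLen_add_le
    simp only [List.length_cons]
    omega

lemma pvMem_productRep_length {n : Nat} {xs : List Int} {c : List Int}
    (h : c ∈ pvProductRep n xs) : c.length = n := by
  induction n generalizing c with
  | zero => simp [pvProductRep] at h; simp [h]
  | succ m ih =>
    simp only [pvProductRep, List.mem_flatMap, List.mem_map] at h
    obtain ⟨x, _, c', hc', rfl⟩ := h
    simp [ih hc']

-- the DFS equals product-then-filter, generalized over the accumulated prefix and used set
lemma pvDfs_eq (k : Int) (rem : Nat) (cfg : List Int) (used : PySem.Set Int) :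
    pvDfs k rem cfg used =
      ((pvProductRep rem (PySem.List.pyRange 0 k 1)).filter
        (fun c => decide (PySem.Set.len (PySem.Set.update used c) = k))).map
        (fun c => cfg ++ c) := by
  induction rem generalizing cfg used with
  | zero =>
    unfold pvDfs
    by_cases hp : k - PySem.Set.len used > ((0 : Nat) : Int)
    · -- pruned: the filter rejects the single empty tuple since len used < k
      rw [if_pos hp]
      have hne : ¬ ((used.length : Int) = k) := by
        simp [PySem.Set.len] at hp; omega
      simp [pvProductRep, PySem.Set.len, PySem.Set.update, List.filter, hne]
    · rw [if_neg hp]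
      by_cases hk : ((used.length : Int) = k) <;>
        simp [pvProductRep, PySem.Set.len, PySem.Set.update, List.filter, hk]
  | succ r ih =>
    unfold pvDfs
    by_cases hp : k - PySem.Set.len used > ((r + 1 : Nat) : Int)
    · -- pruned branch: no c of length r+1 can reach k distinct labels
      rw [if_pos hp]
      symm
      rw [List.map_eq_nil_iff, List.filter_eq_nil_iff]
      intro c hc
      have hlen := pvMem_productRep_length hc
      have hle := pvLen_update_le c used
      simp only [PySem.Set.len] at hp ⊢
      simp only [decide_eq_true_eq]
      rw [hlen] at hle
      push_cast at hp ⊢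
      omega
    · rw [if_neg hp]
      simp only [pvProductRep]
      rw [List.filter_flatMap, List.map_flatMap]
      apply List.flatMap_congr
      intro x _
      rw [pvUnion_singleton, ih (cfg ++ [x]) (PySem.Set.add used x), List.filter_map, List.map_map]
      congr 1
      funext c
      simp [Function.comp, List.append_assoc]

-- A's accumulation loop is a filter
lemma pvFoldl_filter (k : Int) (l : List (List Int)) :
    l.foldl (fun acc c => if PySem.Set.len (PySem.Set.ofList c) = k then acc ++ [c] else acc) [] =
      l.filter (fun c => decide (PySem.Set.len (PySem.Set.ofList c) = k)) := by
  rw [PySem.List.foldl_append_ite_eq_filter (fun c => PySem.Set.len (PySem.Set.ofList c) = k)]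
  simp

-- ===== VERDICT (by name: the statement is the Claim_ definition above) =====
theorem validate_comps_paired_spec : Claim_equal_validate_comps_paired := by
  intro prefix_ suffix k _
  unfold Spec_validate_comps_paired
  simp only [validate_comps_paired, validate_comps_paired_alt]
  rw [pvDfs_eq, pvFoldl_filter]
  have hupd : ∀ c : List Int, PySem.Set.update ([] : PySem.Set Int) c = PySem.Set.ofList c :=
    fun _ => rfl
  simp only [hupd, PySem.Set.empty, List.map_map, List.nil_append]
  rfl
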